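-- pv_equiv track=rewrite | github.com/QSOLKCB/QEC | src/qec/analysis/parity_coherence.py | _has_persistent_jump
-- ===== SOURCE A (Python) =====
-- from typing import Any, Dict, List, Optional
--
-- def _has_persistent_jump(signs: List[int], min_run: int) -> bool:
--     if not signs or min_run <= 0:
--         return False
--     runs = _segment_sign_runs(signs)
--
--     for i in range(len(runs) - 1):
--         left_sign, left_len, _, left_end = runs[i]
--         right_sign, right_len, right_start, _ = runs[i + 1]
--         if right_start != left_end + 1:
--             continue
--         if left_sign != right_sign and left_len >= min_run and right_len >= min_run:
--             return True
--     return False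
--
-- def _segment_sign_runs(signs: List[int]) -> List[tuple[int, int, int, int]]:
--     """Return contiguous non-zero sign runs; zero values terminate runs."""
--     runs: List[tuple[int, int, int, int]] = []
--     current_sign = 0
--     current_len = 0
--     current_start = -1
--
--     for idx, sign in enumerate(signs):
--         if sign == 0:
--             if current_sign != 0 and current_len > 0:
--                 runs.append((current_sign, current_len, current_start, idx - 1))
--             current_sign = 0
--             current_len = 0
--             current_start = -1
--             continue
--
--         if sign == current_sign:
--             current_len += 1
--         else:
--             if current_sign != 0 and current_len > 0:
--                 runs.append((current_sign, current_len, current_start, idx - 1))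
--             current_sign = sign
--             current_len = 1
--             current_start = idx
--
--     if current_sign != 0 and current_len > 0:
--         runs.append((current_sign, current_len, current_start, len(signs) - 1))
--     return runs
-- ===== SOURCE B (Python) =====
-- from typing import List
--
-- def _has_persistent_jump(signs: List[int], min_run: int) -> bool:
--     if not signs or min_run <= 0:
--         return False
--     cur_sign = 0      # sign of the run currently being read (0 = none)
--     cur_len = 0       # its length so far
--     prev_ok = False   # the immediately adjacent previous run had length >= min_run
--     for s in signs:
--         if s == 0:
--             prev_ok = False
--             cur_sign = 0
--             cur_len = 0
--         elif s == cur_sign: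
--             cur_len += 1
--         else:
--             prev_ok = cur_sign != 0 and cur_len >= min_run
--             cur_sign = s
--             cur_len = 1
--         if prev_ok and cur_len >= min_run:
--             return True
--     return False
-- ===== Notes on version B (the rewrite author's own statement) =====
-- stated objective: simpler
-- what changed: Replaces the two-phase design (materialize a list of (sign,len,start,end) run tuples, then scan consecutive pairs for adjacency and length) with a single streaming pass that keeps only the current run's sign/length and one flag saying whether the immediately adjacent previous run was long enough, returning early on success.
import Mathlib
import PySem

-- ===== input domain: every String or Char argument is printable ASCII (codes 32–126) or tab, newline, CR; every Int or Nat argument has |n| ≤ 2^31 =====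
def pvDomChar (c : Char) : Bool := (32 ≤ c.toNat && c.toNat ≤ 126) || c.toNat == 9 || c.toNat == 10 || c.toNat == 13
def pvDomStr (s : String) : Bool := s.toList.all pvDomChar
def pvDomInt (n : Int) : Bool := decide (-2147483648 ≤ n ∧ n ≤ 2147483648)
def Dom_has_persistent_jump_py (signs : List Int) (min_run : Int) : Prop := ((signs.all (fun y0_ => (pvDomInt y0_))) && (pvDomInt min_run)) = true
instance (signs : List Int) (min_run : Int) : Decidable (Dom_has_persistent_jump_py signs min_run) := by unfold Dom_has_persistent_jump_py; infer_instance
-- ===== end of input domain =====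

-- B replaces A's run-list materialization + pairwise scan by a single O(1)-space streaming
-- pass over the signs (objective: simpler).

-- B replaces A's run-list materialization + pairwise scan with a single streaming pass
-- over the signs that keeps O(1) state (objective: simpler).

-- ===== PORT A =====
-- a run is (sign, length, start, end)
-- one step of the loop body of _segment_sign_runs; state = (runs, current_sign, current_len, current_start)
def pvSegStep (st : List (Int × Int × Int × Int) × Int × Int × Int) (p : Int × Int) :
    List (Int × Int × Int × Int) × Int × Int × Int :=
  let (runs, cs, cl, cst) := st
  let (idx, s) := p
  if s = 0 then
    ((if cs ≠ 0 ∧ cl > 0 then runs ++ [(cs, cl, cst, idx - 1)] else runs), 0, 0, -1)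
  else if s = cs then (runs, cs, cl + 1, cst)
  else ((if cs ≠ 0 ∧ cl > 0 then runs ++ [(cs, cl, cst, idx - 1)] else runs), s, 1, idx)

-- _segment_sign_runs: fold the loop body over enumerate(signs), then the final flush
def pvSegmentSignRuns (signs : List Int) : List (Int × Int × Int × Int) :=
  let (runs, cs, cl, cst) := (PySem.List.enumerate signs 0).foldl pvSegStep ([], 0, 0, -1)
  if cs ≠ 0 ∧ cl > 0 then runs ++ [(cs, cl, cst, (signs.length : Int) - 1)] else runs

-- the 'for i in range(len(runs) - 1)' loop with early return, as recursion over the index list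
def pvCheckGo (runs : List (Int × Int × Int × Int)) (min_run : Int) : List Int → Bool
  | [] => false
  | i :: rest =>
    match PySem.List.pyGet? runs i, PySem.List.pyGet? runs (i + 1) with
    | some (ls, ll, _, le), some (rs, rl, rst, _) =>
      if rst ≠ le + 1 then pvCheckGo runs min_run rest
      else if ls ≠ rs ∧ ll ≥ min_run ∧ rl ≥ min_run then true
      else pvCheckGo runs min_run rest
    | _, _ => pvCheckGo runs min_run rest      -- unreachable: i and i + 1 are always in range

def has_persistent_jump_py (signs : List Int) (min_run : Int) : Bool :=
  if signs = [] ∨ min_run ≤ 0 then false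
  else
    let runs := pvSegmentSignRuns signs
    pvCheckGo runs min_run (PySem.List.pyRange 0 ((runs.length : Int) - 1) 1)

-- ===== PORT B =====
-- streaming loop of Source B; state = (cur_sign, cur_len, prev_ok), early return on success
def pvAltGo (m : Int) : List Int → Int → Int → Bool → Bool
  | [], _, _, _ => false
  | s :: rest, cs, cl, p =>
    let st : Bool × Int × Int :=
      if s = 0 then (false, 0, 0)
      else if s = cs then (p, cs, cl + 1)
      else (decide (cs ≠ 0 ∧ cl ≥ m), s, 1)
    if st.1 && decide (st.2.2 ≥ m) then true else pvAltGo m rest st.2.1 st.2.2 st.1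

def has_persistent_jump_py_alt (signs : List Int) (min_run : Int) : Bool :=
  if signs = [] ∨ min_run ≤ 0 then false
  else pvAltGo min_run signs 0 0 false

-- ===== PRECONDITION & SPEC =====
def Spec_has_persistent_jump_py (signs : List Int) (min_run : Int) (out : Bool) : Prop := out = has_persistent_jump_py_alt signs min_run
instance (signs : List Int) (min_run : Int) (out : Bool) : Decidable (Spec_has_persistent_jump_py signs min_run out) := by unfold Spec_has_persistent_jump_py; infer_instance

-- ===== CLAIM (what is proved, stated in full; the proofs are below) =====
def Claim_equal_has_persistent_jump_py : Prop := ∀ (signs : List Int) (min_run : Int), Dom_has_persistent_jump_py signs min_run → Spec_has_persistent_jump_py signs min_run (has_persistent_jump_py signs min_run)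

-- ===== LEMMAS AND PROOFS =====

-- the final flush of _segment_sign_runs, as a named helper for the foldl/recursion bridge
def pvFlush (st : List (Int × Int × Int × Int) × Int × Int × Int) (e : Int) : List (Int × Int × Int × Int) :=
  if st.2.1 ≠ 0 ∧ st.2.2.1 > 0 then st.1 ++ [(st.2.1, st.2.2.1, st.2.2.2, e)] else st.1

-- proof-side view of _segment_sign_runs, by structural recursion carrying the index
def pvSegAux : List Int → Int → Int → Int → Int → List (Int × Int × Int × Int)
  | [], idx, cs, cl, cst => if cs ≠ 0 ∧ cl > 0 then [(cs, cl, cst, idx - 1)] else []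
  | s :: rest, idx, cs, cl, cst =>
    if s = 0 then
      (if cs ≠ 0 ∧ cl > 0 then [(cs, cl, cst, idx - 1)] else []) ++ pvSegAux rest (idx + 1) 0 0 (-1)
    else if s = cs then pvSegAux rest (idx + 1) cs (cl + 1) cst
    else
      (if cs ≠ 0 ∧ cl > 0 then [(cs, cl, cst, idx - 1)] else []) ++ pvSegAux rest (idx + 1) s 1 idx

-- adjacent-pair scan of a run list, by structural recursion (the proof-side view of A's check loop)
def pvCheckRuns (m : Int) : List (Int × Int × Int × Int) → Bool
  | [] => false
  | [_] => false
  | (ls, ll, _, le) :: (rs, rl, rst, re) :: tl =>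
    (if rst ≠ le + 1 then false
     else if ls ≠ rs ∧ ll ≥ m ∧ rl ≥ m then true else false)
    || pvCheckRuns m ((rs, rl, rst, re) :: tl)

theorem pvSegBridge (l : List Int) : ∀ (n : Int) (runs0 : List (Int × Int × Int × Int)) (cs cl cst : Int),
    pvFlush ((PySem.List.enumerate l n).foldl pvSegStep (runs0, cs, cl, cst)) (n + (l.length : Int) - 1)
    = runs0 ++ pvSegAux l n cs cl cst := by
  induction l with
  | nil =>
    intro n runs0 cs cl cst
    simp only [PySem.List.enumerate_nil, List.foldl_nil, pvSegAux, pvFlush, List.length_nil]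
    split_ifs with h <;> simp
  | cons s rest ih =>
    intro n runs0 cs cl cst
    have hlen : n + ((s :: rest).length : Int) - 1 = (n + 1) + (rest.length : Int) - 1 := by
      simp [List.length_cons]; push_cast; ring
    rw [hlen]
    simp only [PySem.List.enumerate_cons, List.foldl_cons]
    by_cases h0 : s = 0
    · simp only [pvSegStep, h0, if_pos rfl]
      rw [ih]
      simp [pvSegAux, h0, List.append_assoc]
      split_ifs <;> simp
    · by_cases hc : s = cs
      · subst hc
        simp only [pvSegStep, if_neg h0, if_pos rfl]
        rw [ih]
        simp [pvSegAux, h0]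
      · simp only [pvSegStep, if_neg h0, if_neg hc]
        rw [ih]
        simp [pvSegAux, h0, hc, List.append_assoc]
        split_ifs <;> simp

theorem pvCheckGoEq (m : Int) : ∀ (rs pref : List (Int × Int × Int × Int)),
    pvCheckGo (pref ++ rs) m (PySem.List.pyRange (pref.length : Int) ((pref.length : Int) + (rs.length : Int) - 1) 1)
      = pvCheckRuns m rs := by
  intro rs
  induction rs with
  | nil =>
    intro pref
    rw [PySem.List.pyRange_one_eq_nil (by simp)]
    rfl
  | cons r1 tl ih =>
    intro pref
    match tl with
    | [] =>
      rw [PySem.List.pyRange_one_eq_nil (by simp)]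
      rfl
    | r2 :: tl2 =>
      rw [PySem.List.pyRange_one_cons (by simp; omega)]
      obtain ⟨ls, ll, lst, le⟩ := r1
      obtain ⟨rs2, rl, rst, re⟩ := r2
      have h1 : PySem.List.pyGet? (pref ++ (ls,ll,lst,le) :: (rs2,rl,rst,re) :: tl2) (pref.length : Int) = some (ls,ll,lst,le) :=
        PySem.List.pyGet?_append_length _ _ _
      have h2 : PySem.List.pyGet? (pref ++ (ls,ll,lst,le) :: (rs2,rl,rst,re) :: tl2) ((pref.length : Int) + 1) = some (rs2,rl,rst,re) := by
        rw [show (pref ++ (ls,ll,lst,le) :: (rs2,rl,rst,re) :: tl2) = (pref ++ [(ls,ll,lst,le)]) ++ (rs2,rl,rst,re) :: tl2 by simp]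
        rw [show ((pref.length : Int) + 1) = ((pref ++ [(ls,ll,lst,le)]).length : Int) by simp]
        exact PySem.List.pyGet?_append_length _ _ _
      have hrec : ∀ ix, pvCheckGo (pref ++ (ls,ll,lst,le) :: (rs2,rl,rst,re) :: tl2) m ix
          = pvCheckGo ((pref ++ [(ls,ll,lst,le)]) ++ (rs2,rl,rst,re) :: tl2) m ix := by
        intro ix; simp
      have ihx := ih (pref ++ [(ls,ll,lst,le)])
      have hlen : ((pref ++ [(ls,ll,lst,le)]).length : Int) = (pref.length : Int) + 1 := by simp
      rw [hlen] at ihx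
      have hup : (pref.length : Int) + 1 + (((rs2,rl,rst,re) :: tl2).length : Int) - 1
          = (pref.length : Int) + ((((ls,ll,lst,le)) :: (rs2,rl,rst,re) :: tl2).length : Int) - 1 := by
        simp; push_cast; ring
      rw [hup] at ihx
      simp only [pvCheckGo, h1, h2, pvCheckRuns]
      split_ifs with hadj hcond
      · rw [hrec _, ihx]; simp [hadj]
      · simp [hadj, hcond]
      · rw [hrec _, ihx]; simp [hadj, hcond]

theorem pvSegAux_first (l : List Int) : ∀ (idx cs cl cst : Int), cs ≠ 0 → 1 ≤ cl →
    ∃ k e tl, pvSegAux l idx cs cl cst = (cs, cl + k, cst, e) :: tl ∧ 0 ≤ k := by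
  induction l with
  | nil =>
    intro idx cs cl cst hcs hcl
    exact ⟨0, idx - 1, [], by simp [pvSegAux, hcs, show (0:Int) < cl by omega], le_refl 0⟩
  | cons s rest ih =>
    intro idx cs cl cst hcs hcl
    by_cases h0 : s = 0
    · exact ⟨0, idx - 1, pvSegAux rest (idx+1) 0 0 (-1), by simp [pvSegAux, h0, hcs, show (0:Int) < cl by omega], le_refl 0⟩
    · by_cases hc : s = cs
      · obtain ⟨k, e, tl, heq, hk⟩ := ih (idx+1) cs (cl+1) cst hcs (by omega)
        subst hc
        refine ⟨k + 1, e, tl, ?_, by omega⟩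
        rw [show cl + (k + 1) = cl + 1 + k from by ring]
        simp only [pvSegAux, if_neg h0, if_pos rfl]
        exact heq
      · exact ⟨0, idx - 1, pvSegAux rest (idx+1) s 1 idx, by simp [pvSegAux, h0, hc, hcs, show (0:Int) < cl by omega], le_refl 0⟩

theorem pvSegAux_head_start (l : List Int) : ∀ (idx cst : Int),
    (pvSegAux l idx 0 0 cst = [] ∨ ∃ a b s e tl, pvSegAux l idx 0 0 cst = (a, b, s, e) :: tl ∧ idx ≤ s) := by
  induction l with
  | nil => intro idx cst; left; simp [pvSegAux]
  | cons s rest ih =>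
    intro idx cst
    by_cases h0 : s = 0
    · rcases ih (idx+1) (-1) with h | ⟨a,b,st,e,tl,heq,hle⟩
      · left; simp [pvSegAux, h0, h]
      · right; exact ⟨a,b,st,e,tl, by simp [pvSegAux, h0, heq], by omega⟩
    · obtain ⟨k, e, tl, heq, hk⟩ := pvSegAux_first rest (idx+1) s 1 idx h0 (le_refl 1)
      right
      exact ⟨s, 1+k, idx, e, tl, by simp [pvSegAux, h0, heq], le_refl idx⟩

theorem pvCheckRuns_drop (m : Int) (a : Int × Int × Int × Int) (tl : List (Int × Int × Int × Int))
    (h : ∀ b ∈ tl.head?, (if b.2.2.1 ≠ a.2.2.2 + 1 then false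
           else if a.1 ≠ b.1 ∧ a.2.1 ≥ m ∧ b.2.1 ≥ m then true else false) = false) :
    pvCheckRuns m (a :: tl) = pvCheckRuns m tl := by
  obtain ⟨a1,a2,a3,a4⟩ := a
  match tl with
  | [] => rfl
  | (b1,b2,b3,b4) :: tl2 =>
    have hb := h (b1,b2,b3,b4) rfl
    simp only [pvCheckRuns, hb, Bool.false_or]

theorem pvMain (m : Int) (hm : 0 < m) (l : List Int) : ∀ (idx cs cl cst : Int) (p : Bool),
    (cs = 0 → cl = 0 ∧ p = false) → (cs ≠ 0 → 1 ≤ cl ∧ cst = idx - cl) → (p = true → cl < m) →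
    pvAltGo m l cs cl p
      = pvCheckRuns m ((if p then [(-cs, m, cst - m, cst - 1)] else []) ++ pvSegAux l idx cs cl cst) := by
  induction l with
  | nil =>
    intro idx cs cl cst p h0 hns hp
    simp only [pvAltGo, pvSegAux]
    cases p with
    | false =>
      simp only [Bool.false_eq_true, if_false, List.nil_append]
      split_ifs <;> rfl
    | true =>
      have hcs : cs ≠ 0 := by intro h; exact absurd (h0 h).2 (by simp)
      obtain ⟨hcl, hcst⟩ := hns hcs
      have hlt := hp rfl
      rw [if_pos rfl, if_pos ⟨hcs, by omega⟩, List.singleton_append]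
      simp only [pvCheckRuns]
      rw [if_neg (by omega), if_neg (by rintro ⟨-, -, h3⟩; omega)]
      rfl
  | cons s rest ih =>
    intro idx cs cl cst p h0 hns hp
    by_cases hz : s = 0
    · -- zero: reset
      simp only [pvAltGo, if_pos hz, Bool.false_and, Bool.false_eq_true, if_false]
      rw [ih (idx+1) 0 0 (-1) false (by intro _; exact ⟨rfl, rfl⟩) (by intro h; exact absurd rfl h) (by intro h; cases h)]
      simp only [Bool.false_eq_true, if_false, List.nil_append]
      simp only [pvSegAux, if_pos hz]
      by_cases hcs : cs = 0
      · obtain ⟨hcl, hpf⟩ := h0 hcs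
        subst hpf
        simp [hcs]
      · obtain ⟨hcl, hcst⟩ := hns hcs
        have hdropF : pvCheckRuns m ((cs, cl, cst, idx - 1) :: pvSegAux rest (idx+1) 0 0 (-1))
            = pvCheckRuns m (pvSegAux rest (idx+1) 0 0 (-1)) := by
          apply pvCheckRuns_drop
          rcases pvSegAux_head_start rest (idx+1) (-1) with hnil | ⟨x1,x2,x3,x4,xtl,heq,hle⟩
          · rw [hnil]; intro b hb; cases hb
          · rw [heq]; intro b hb
            simp only [List.nil_append, List.head?_cons, Option.mem_def, Option.some.injEq] at hb
            subst hb
            dsimp only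
            rw [if_pos (by omega)]
        cases p with
        | false =>
          simp only [Bool.false_eq_true, if_false, List.nil_append]
          rw [if_pos (⟨hcs, by omega⟩ : cs ≠ 0 ∧ cl > 0), List.singleton_append]
          exact hdropF.symm
        | true =>
          have hlt := hp rfl
          rw [if_pos rfl, if_pos (⟨hcs, by omega⟩ : cs ≠ 0 ∧ cl > 0)]
          simp only [List.singleton_append, List.cons_append, List.nil_append]
          rw [pvCheckRuns_drop m _ _ ?hpair]
          case hpair =>
            intro b hb
            simp only [List.nil_append, List.head?_cons, Option.mem_def, Option.some.injEq] at hb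
            subst hb
            dsimp only
            rw [if_neg (by omega), if_neg (by rintro ⟨-, -, h3⟩; omega)]
          exact hdropF.symm
    · by_cases hc : s = cs
      · -- same sign: extend current run
        subst hc
        have hcs : s ≠ 0 := hz
        obtain ⟨hcl, hcst⟩ := hns hcs
        simp only [pvAltGo, if_neg hz, eq_self_iff_true, if_true]
        simp only [pvSegAux, if_neg hz, eq_self_iff_true, if_true]
        by_cases hchk : p = true ∧ cl + 1 ≥ m
        · obtain ⟨hpt, hge⟩ := hchk
          subst hpt
          rw [if_pos (by simp [hge])]
          obtain ⟨k, e, tl, heq, hk⟩ := pvSegAux_first rest (idx+1) s (cl+1) cst hcs (by omega)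
          rw [if_pos rfl, heq, List.singleton_append]
          simp only [pvCheckRuns]
          rw [if_neg (by omega), if_pos ⟨by omega, le_refl m, by omega⟩]
          simp
        · have hno : ¬ (p && decide (cl + 1 ≥ m)) = true := by
            simp only [Bool.and_eq_true, decide_eq_true_eq]; exact hchk
          rw [if_neg hno]
          exact ih (idx+1) s (cl+1) cst p (by intro h; exact absurd h hcs)
            (by intro _; exact ⟨by omega, by omega⟩)
            (by intro hpt; rcases Decidable.em (cl + 1 ≥ m) with h | h
                · exact absurd ⟨hpt, h⟩ hchk
                · omega)
      · -- new nonzero sign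
        simp only [pvAltGo, if_neg hz, if_neg hc]
        simp only [pvSegAux, if_neg hz, if_neg hc]
        by_cases hcs : cs = 0
        · obtain ⟨hcl, hpf⟩ := h0 hcs
          subst hpf
          rw [show decide (cs ≠ 0 ∧ cl ≥ m) = false by simp [hcs]]
          simp only [Bool.false_and, Bool.false_eq_true, if_false]
          rw [ih (idx+1) s 1 idx false (by intro h; exact absurd h hz) (by intro _; exact ⟨le_refl 1, by omega⟩) (by intro h; cases h)]
          simp [hcs]
        · obtain ⟨hcl, hcst⟩ := hns hcs
          rw [if_pos (⟨hcs, by omega⟩ : cs ≠ 0 ∧ cl > 0)]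
          obtain ⟨k, e, tl, heq, hk⟩ := pvSegAux_first rest (idx+1) s 1 idx hz (le_refl 1)
          have hvpre : pvCheckRuns m ((if p then [(-cs, m, cst - m, cst - 1)] else []) ++ (cs, cl, cst, idx - 1) :: pvSegAux rest (idx+1) s 1 idx)
              = pvCheckRuns m ((cs, cl, cst, idx - 1) :: pvSegAux rest (idx+1) s 1 idx) := by
            cases p with
            | false => simp
            | true =>
              have hlt := hp rfl
              rw [if_pos rfl, List.singleton_append]
              apply pvCheckRuns_drop
              intro b hb
              simp only [List.nil_append, List.head?_cons, Option.mem_def, Option.some.injEq] at hb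
              subst hb
              dsimp only
              rw [if_neg (by omega), if_neg (by rintro ⟨-, -, h3⟩; omega)]
          rw [List.singleton_append, hvpre]
          by_cases hchk : (cs ≠ 0 ∧ cl ≥ m) ∧ (1:Int) ≥ m
          · obtain ⟨⟨-, hge⟩, h1m⟩ := hchk
            rw [if_pos (by simp only [Bool.and_eq_true, decide_eq_true_eq]; exact ⟨⟨hcs, hge⟩, h1m⟩)]
            rw [heq]
            simp only [pvCheckRuns]
            rw [if_neg (by omega), if_pos ⟨fun hh => hc hh.symm, by omega, by omega⟩]
            simp
          · have hno : ¬ (decide (cs ≠ 0 ∧ cl ≥ m) && decide ((1:Int) ≥ m)) = true := by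
              simp only [Bool.and_eq_true, decide_eq_true_eq]
              rintro ⟨h1, h2⟩; exact hchk ⟨h1, h2⟩
            rw [if_neg hno]
            rw [ih (idx+1) s 1 idx (decide (cs ≠ 0 ∧ cl ≥ m)) (by intro h; exact absurd h hz)
              (by intro _; exact ⟨le_refl 1, by omega⟩)
              (by intro hpt
                  simp only [decide_eq_true_eq] at hpt
                  rcases Decidable.em ((1:Int) ≥ m) with h | h
                  · exact absurd ⟨hpt, h⟩ hchk
                  · omega)]
            by_cases hpq : cs ≠ 0 ∧ cl ≥ m
            · have c1 : (if (cs : Int) ≠ s ∧ cl ≥ m ∧ 1 + k ≥ m then true else false)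
                  = (if (-s : Int) ≠ s ∧ m ≥ m ∧ 1 + k ≥ m then true else false) := by
                by_cases hkm : 1 + k ≥ m
                · rw [if_pos ⟨fun hh => hc hh.symm, hpq.2, hkm⟩, if_pos ⟨by omega, le_refl m, hkm⟩]
                · rw [if_neg (by rintro ⟨-, -, h3⟩; exact hkm h3), if_neg (by rintro ⟨-, -, h3⟩; exact hkm h3)]
              rw [if_pos (by simpa using hpq), heq, List.singleton_append]
              simp only [pvCheckRuns]
              rw [if_neg (show ¬ (idx ≠ idx - 1 + 1) by omega), if_neg (show ¬ (idx ≠ idx - 1 + 1) by omega), c1]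
            · rw [if_neg (by simpa using hpq), heq, List.nil_append]
              rw [pvCheckRuns_drop m (cs, cl, cst, idx - 1) ((s, 1 + k, idx, e) :: tl) ?hp2]
              case hp2 =>
                intro b hb
                simp only [List.nil_append, List.head?_cons, Option.mem_def, Option.some.injEq] at hb
                subst hb
                dsimp only
                rw [if_neg (by omega), if_neg (by rintro ⟨hh1, hh2, -⟩; exact hpq ⟨hcs, hh2⟩)]

-- ===== VERDICT (by name: the statement is the Claim_ definition above) =====
theorem has_persistent_jump_py_spec : Claim_equal_has_persistent_jump_py := by
  intro signs min_run _
  unfold Spec_has_persistent_jump_py has_persistent_jump_py has_persistent_jump_py_alt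
  by_cases hg : signs = [] ∨ min_run ≤ 0
  · simp [hg]
  · simp only [hg, if_false]
    have hm : 0 < min_run := by
      by_contra h
      exact hg (Or.inr (by omega))
    have hseg : pvSegmentSignRuns signs = pvSegAux signs 0 0 0 (-1) := by
      have hb := pvSegBridge signs 0 [] 0 0 (-1)
      rw [zero_add, List.nil_append] at hb
      exact hb
    have hchk := pvCheckGoEq min_run (pvSegAux signs 0 0 0 (-1)) []
    have hmain := pvMain min_run hm signs 0 0 0 (-1) false
      (by intro _; exact ⟨rfl, rfl⟩) (by intro h; exact absurd rfl h) (by intro h; cases h)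
    simp only [hseg]
    simp only [List.nil_append, List.length_nil, Int.natCast_zero, zero_add] at hchk
    rw [hchk, hmain]
    simp
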